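-- pv_equiv track=rewrite | github.com/Narehase/py_SN_game | Sngame.py | ful_up
-- ===== SOURCE A (Python) =====
-- def ful_up(na, pix = 10):
--     xf =[]
--     yf =[]
--     for y in na:
--         for i in range(pix):
--             for x in y:
--                 for i in range(pix):
--                     xf.append(x)
--             yf.append(xf)
--             xf =[]
--     return yf
-- ===== SOURCE B (Python) =====
-- def ful_up(na, pix=10):
--     # Closed-form indexing: output cell (r, c) is na[r // pix][c // pix].
--     return [[na[r // pix][c // pix] for c in range(len(na[r // pix]) * pix)]
--             for r in range(len(na) * pix)]
-- ===== Notes on version B (the rewrite author's own statement) =====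
-- stated objective: alternative
-- what changed: B has no replication loops or appends at all: it computes each output cell directly by closed-form indexing, out[r][c] = na[r // pix][c // pix], over the output's index grid, instead of A's quadruple nested append loop.
import Mathlib
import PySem

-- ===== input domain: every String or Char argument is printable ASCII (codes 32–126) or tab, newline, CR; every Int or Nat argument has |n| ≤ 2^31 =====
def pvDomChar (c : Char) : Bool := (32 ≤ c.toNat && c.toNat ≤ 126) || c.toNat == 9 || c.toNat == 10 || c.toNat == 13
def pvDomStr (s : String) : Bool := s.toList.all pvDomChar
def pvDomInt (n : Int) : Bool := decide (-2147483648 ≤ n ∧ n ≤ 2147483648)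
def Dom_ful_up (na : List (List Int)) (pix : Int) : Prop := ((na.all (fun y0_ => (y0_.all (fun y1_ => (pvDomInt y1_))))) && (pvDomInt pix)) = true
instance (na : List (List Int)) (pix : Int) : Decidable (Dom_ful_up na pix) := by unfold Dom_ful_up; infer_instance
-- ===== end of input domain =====

-- B replaces A's replication loops by closed-form indexing (output cell (r,c) = na[r//pix][c//pix]); alternative algorithm, same output.
-- ===== PORT A =====
-- literal transliteration of A: state (xf, yf); quadruple nested loops via foldl over pyRange
def ful_up (na : List (List Int)) (pix : Int) : List (List Int) :=
  (na.foldl (fun (st : List Int × List (List Int)) y =>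
    (PySem.List.pyRange 0 pix 1).foldl (fun (st2 : List Int × List (List Int)) _ =>
      let xf := y.foldl (fun xf x =>
        (PySem.List.pyRange 0 pix 1).foldl (fun xf _ => xf ++ [x]) xf) st2.1
      ([], st2.2 ++ [xf])) st) ([], [])).2

-- ===== PORT B =====
-- B: closed-form indexing; indices r//pix, c//pix are always in range, so pyGetD's default is never used
def ful_up_alt (na : List (List Int)) (pix : Int) : List (List Int) :=
  (PySem.List.pyRange 0 ((na.length : Int) * pix) 1).map (fun r =>
    let row := PySem.List.pyGetD na (PySem.Int.floordiv r pix) []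
    (PySem.List.pyRange 0 ((row.length : Int) * pix) 1).map (fun c =>
      PySem.List.pyGetD row (PySem.Int.floordiv c pix) 0))

-- ===== PRECONDITION & SPEC =====
def Spec_ful_up (na : List (List Int)) (pix : Int) (out : List (List Int)) : Prop := out = ful_up_alt na pix
instance (na : List (List Int)) (pix : Int) (out : List (List Int)) : Decidable (Spec_ful_up na pix out) := by unfold Spec_ful_up; infer_instance

-- ===== CLAIM =====
def Claim_equal_ful_up : Prop := ∀ (na : List (List Int)) (pix : Int), Dom_ful_up na pix → Spec_ful_up na pix (ful_up na pix)

-- ===== LEMMAS AND PROOFS =====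

-- A's innermost pair of loops over one row, with the row-duplication loop, as a flatMap/map form
theorem pv_const_row (r : List Int) (w : List Int) (yf : List (List Int)) :
    r.foldl (fun (st2 : List Int × List (List Int)) (_ : Int) =>
      (([] : List Int), st2.2 ++ [st2.1 ++ w])) ([], yf)
      = ([], yf ++ r.map (fun _ => w)) := by
  induction r generalizing yf with
  | nil => simp
  | cons h t ih =>
    rw [List.foldl_cons, ih]
    simp

theorem pv_row (r : List Int) (y : List Int) (yf : List (List Int)) :
    r.foldl (fun (st2 : List Int × List (List Int)) (_ : Int) =>
      let xf := y.foldl (fun xf x => r.foldl (fun xf _ => xf ++ [x]) xf) st2.1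
      ([], st2.2 ++ [xf])) ([], yf)
      = ([], yf ++ r.map (fun _ => y.flatMap (fun x => r.map (fun _ => x)))) := by
  have hf : (fun (st2 : List Int × List (List Int)) (_ : Int) =>
      let xf := y.foldl (fun xf x => r.foldl (fun xf _ => xf ++ [x]) xf) st2.1
      (([], st2.2 ++ [xf]) : List Int × List (List Int)))
      = (fun (st2 : List Int × List (List Int)) (_ : Int) =>
      (([] : List Int), st2.2 ++ [st2.1 ++ y.flatMap (fun x => r.map (fun _ => x))])) := by
    funext st2 i
    simp [List.flatMap]
  rw [hf, pv_const_row]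

theorem pv_A (r : List Int) (na : List (List Int)) (yf : List (List Int)) :
    (na.foldl (fun (st : List Int × List (List Int)) y =>
      r.foldl (fun (st2 : List Int × List (List Int)) _ =>
        let xf := y.foldl (fun xf x => r.foldl (fun xf _ => xf ++ [x]) xf) st2.1
        ([], st2.2 ++ [xf])) st) ([], yf)).2
      = yf ++ na.flatMap (fun y => r.map (fun _ => y.flatMap (fun x => r.map (fun _ => x)))) := by
  induction na generalizing yf with
  | nil => simp
  | cons h t ih =>
    simp only [List.foldl, List.flatMap_cons]
    rw [pv_row, ih]
    simp

-- indexing characterisation: reading position i/p of L for i < L.length * p is the p-fold replication of L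
theorem pv_rep_index {α β : Type} (f : α → β) (d : α) (p : Nat) (hp : 0 < p) (L : List α) :
    (List.range (L.length * p)).map (fun i => f (L.getD (i / p) d))
      = L.flatMap (fun y => List.replicate p (f y)) := by
  induction L with
  | nil => simp
  | cons y t ih =>
    have hlen : (y :: t).length * p = p + t.length * p := by
      simp [List.length_cons]; ring
    rw [hlen, List.range_add, List.map_append, List.map_map, List.flatMap_cons, ← ih]
    congr 1
    · have h1 : ∀ i ∈ List.range p,
          f ((y :: t).getD (i / p) d) = f y := by
        intro i hi
        rw [Nat.div_eq_of_lt (List.mem_range.mp hi)]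
        rfl
      rw [List.map_congr_left h1]
      simp [List.map_const']
    · apply List.map_congr_left
      intro i _
      have : (p + i) / p = i / p + 1 := by
        rw [Nat.add_comm, Nat.add_div_right _ hp]
      simp [this]

-- B's inner comprehension on one row equals p-fold element replication
theorem pv_inner (p : Nat) (hp : 0 < p) (row : List Int) :
    (PySem.List.pyRange 0 ((row.length : Int) * (p : Int)) 1).map
        (fun c => PySem.List.pyGetD row (PySem.Int.floordiv c (p : Int)) 0)
      = row.flatMap (fun x => List.replicate p x) := by
  have hcast : ((row.length : Int) * (p : Int)) = ((row.length * p : Nat) : Int) := by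
    push_cast; ring
  rw [hcast, PySem.List.pyRange_zero_nat, List.map_map,
      ← pv_rep_index (fun x => x) 0 p hp row]
  apply List.map_congr_left
  intro i _
  show PySem.List.pyGetD row (PySem.Int.floordiv (i : Int) (p : Int)) 0 = _
  rw [PySem.Int.floordiv_natCast, PySem.List.pyGetD_natCast]

theorem pv_B_pos (p : Nat) (hp : 0 < p) (na : List (List Int)) :
    ful_up_alt na (p : Int)
      = na.flatMap (fun y => List.replicate p (y.flatMap (fun x => List.replicate p x))) := by
  unfold ful_up_alt
  have hcast : ((na.length : Int) * (p : Int)) = ((na.length * p : Nat) : Int) := by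
    push_cast; ring
  rw [hcast, PySem.List.pyRange_zero_nat, List.map_map,
      ← pv_rep_index (fun row => row.flatMap (fun x => List.replicate p x)) [] p hp na]
  apply List.map_congr_left
  intro i _
  show (let row := PySem.List.pyGetD na (PySem.Int.floordiv (i : Int) (p : Int)) [];
        (PySem.List.pyRange 0 ((row.length : Int) * (p : Int)) 1).map
          (fun c => PySem.List.pyGetD row (PySem.Int.floordiv c (p : Int)) 0)) = _
  rw [PySem.Int.floordiv_natCast, PySem.List.pyGetD_natCast]
  exact pv_inner p hp _

theorem pv_map_const_pyRange {α : Type} (p : Nat) (v : α) :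
    (PySem.List.pyRange 0 (p : Int) 1).map (fun _ => v) = List.replicate p v := by
  rw [List.map_const', PySem.List.length_pyRange_one]
  norm_num

-- ===== VERDICT =====
theorem ful_up_spec : Claim_equal_ful_up := by
  intro na pix _
  unfold Spec_ful_up ful_up
  rw [pv_A]
  by_cases hp : 0 < pix
  · obtain ⟨p, rfl⟩ : ∃ p : Nat, pix = (p : Int) := ⟨pix.toNat, (Int.toNat_of_nonneg hp.le).symm⟩
    have hp' : 0 < p := by exact_mod_cast hp
    rw [pv_B_pos p hp' na]
    simp only [pv_map_const_pyRange, List.nil_append]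
  · -- pix ≤ 0: both sides are []
    have hr : PySem.List.pyRange 0 pix 1 = [] :=
      PySem.List.pyRange_one_eq_nil (by omega)
    have hm : (na.length : Int) * pix ≤ 0 :=
      mul_nonpos_of_nonneg_of_nonpos (by positivity) (by omega)
    have hrm : PySem.List.pyRange 0 ((na.length : Int) * pix) 1 = [] :=
      PySem.List.pyRange_one_eq_nil (by omega)
    unfold ful_up_alt
    rw [hr, hrm]
    simp
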